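-- pv_equiv track=rewrite | github.com/Pyk017/Python | InfyTQ(Infosys_Platform)/Fundamentals_of_Python_Practise_Problems/Level2/Level-42.py | maxvalue_in_column
-- ===== SOURCE A (Python) =====
-- def maxvalue_in_column(grid):
--     result_list = []
--     temp = 0
--     m = len(grid)
--     n = len(grid[0])
--     for i in range(n):
--         for j in range(m):
--             if grid[j][i] > temp:
--                 temp = grid[j][i]
--
--         result_list.append(temp)
--         temp = 0
--
--     return result_list
-- ===== SOURCE B (Python) =====
-- def maxvalue_in_column(grid):
--     # single row-major pass maintaining all column maxima in parallel
--     n = len(grid[0])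
--     result = [0] * n
--     for row in grid:
--         for i in range(n):
--             if row[i] > result[i]:
--                 result[i] = row[i]
--     return result
-- ===== Notes on version B (the rewrite author's own statement) =====
-- stated objective: alternative
-- what changed: Column-major nested scans (n separate passes over all rows) replaced by a single row-major pass maintaining an accumulator array of column maxima updated in parallel, keeping the 0 lower bound.
import Mathlib
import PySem

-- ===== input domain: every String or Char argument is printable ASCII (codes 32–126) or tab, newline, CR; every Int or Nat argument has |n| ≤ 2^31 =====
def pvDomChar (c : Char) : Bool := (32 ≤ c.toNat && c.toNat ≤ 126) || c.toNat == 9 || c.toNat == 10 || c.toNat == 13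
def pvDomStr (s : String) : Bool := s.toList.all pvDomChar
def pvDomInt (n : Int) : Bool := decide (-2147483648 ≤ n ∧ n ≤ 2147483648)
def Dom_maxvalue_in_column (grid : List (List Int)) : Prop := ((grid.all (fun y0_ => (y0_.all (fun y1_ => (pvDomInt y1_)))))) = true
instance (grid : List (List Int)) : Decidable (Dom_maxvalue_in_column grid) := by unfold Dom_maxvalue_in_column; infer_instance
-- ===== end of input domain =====

-- B replaces A's n column-major scans by a single row-major pass over the rows that
-- maintains an accumulator array of all column maxima in parallel (same cost, alternative decomposition).

-- ===== PORT A =====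
def maxvalue_in_column (grid : List (List Int)) : List Int :=
  let m : Int := grid.length
  let n : Int := (grid.headD []).length
  (PySem.List.pyRange 0 n 1).foldl (fun result_list i =>
    result_list ++ [(PySem.List.pyRange 0 m 1).foldl (fun temp j =>
      if PySem.List.pyGetD (PySem.List.pyGetD grid j []) i 0 > temp
      then PySem.List.pyGetD (PySem.List.pyGetD grid j []) i 0
      else temp) 0]) []

-- ===== PORT B =====
def maxvalue_in_column_alt (grid : List (List Int)) : List Int :=
  let n : Nat := (grid.headD []).length
  grid.foldl (fun result row =>
    (List.range n).foldl (fun result (i : Nat) =>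
      if PySem.List.pyGetD row (i : Int) 0 > result.getD i 0
      then result.set i (PySem.List.pyGetD row (i : Int) 0)
      else result) result)
    (List.replicate n 0)

-- ===== PRECONDITION & SPEC =====
-- Pre_: the Python A raises IndexError on an empty grid (grid[0]) and on a grid with a row
-- shorter than the first row (grid[j][i]); exactly those inputs are excluded.
def Pre_maxvalue_in_column (grid : List (List Int)) : Prop :=
  grid ≠ [] ∧ ∀ row ∈ grid, (grid.headD []).length ≤ row.length
instance (grid : List (List Int)) : Decidable (Pre_maxvalue_in_column grid) := by
  unfold Pre_maxvalue_in_column; infer_instance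
def pvWitness_maxvalue_in_column : List (List Int) := [[1, -2], [3, 4]]
def Spec_maxvalue_in_column (grid : List (List Int)) (out : List Int) : Prop := out = maxvalue_in_column_alt grid
instance (grid : List (List Int)) (out : List Int) : Decidable (Spec_maxvalue_in_column grid out) := by unfold Spec_maxvalue_in_column; infer_instance

-- ===== CLAIM (what is proved, stated in full; the proofs are below) =====
def Claim_equal_maxvalue_in_column : Prop := ∀ (grid : List (List Int)), Dom_maxvalue_in_column grid → Pre_maxvalue_in_column grid → Spec_maxvalue_in_column grid (maxvalue_in_column grid)

-- ===== LEMMAS AND PROOFS =====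

-- the column maximum (with the 0 lower bound both programs share)
def colMax (grid : List (List Int)) (j : Nat) : Int :=
  grid.foldl (fun t row => if row.getD j 0 > t then row.getD j 0 else t) 0

-- A computes the list of column maxima
lemma portA_eq_map (grid : List (List Int)) :
    maxvalue_in_column grid = (List.range (grid.headD []).length).map (colMax grid) := by
  unfold maxvalue_in_column
  simp only []
  rw [PySem.List.foldl_append_singleton_eq_map]
  have hinner : ∀ i : Int,
      (PySem.List.pyRange 0 (grid.length : Int) 1).foldl (fun temp j =>
        if PySem.List.pyGetD (PySem.List.pyGetD grid j []) i 0 > temp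
        then PySem.List.pyGetD (PySem.List.pyGetD grid j []) i 0
        else temp) 0
      = grid.foldl (fun temp row =>
        if PySem.List.pyGetD row i 0 > temp then PySem.List.pyGetD row i 0 else temp) 0 :=
    fun i => PySem.List.foldl_pyRange_zero_pyGetD' grid ([] : List Int)
      (fun temp row => if PySem.List.pyGetD row i 0 > temp
                       then PySem.List.pyGetD row i 0 else temp) 0
  simp only [hinner]
  rw [PySem.List.pyRange_zero_nat, List.map_map]
  simp [colMax]

-- B's inner loop: length preserved
lemma innerB_length (row : List Int) (k : Nat) (res : List Int) :
    ((List.range k).foldl (fun result (i : Nat) =>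
      if PySem.List.pyGetD row (i : Int) 0 > result.getD i 0
      then result.set i (PySem.List.pyGetD row (i : Int) 0) else result) res).length
    = res.length := by
  induction k generalizing res with
  | zero => simp
  | succ k ih =>
      rw [List.range_succ, List.foldl_append]
      simp only [List.foldl_cons, List.foldl_nil]
      split
      · rw [List.length_set, ih]
      · rw [ih]

-- B's inner loop, pointwise: position j gets max-updated by row (for j < k), others unchanged
lemma innerB_getD (row : List Int) (k : Nat) (res : List Int) (j : Nat)
    (hj : j < res.length) (hk : k ≤ res.length) :
    ((List.range k).foldl (fun result (i : Nat) =>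
      if PySem.List.pyGetD row (i : Int) 0 > result.getD i 0
      then result.set i (PySem.List.pyGetD row (i : Int) 0) else result) res).getD j 0
    = if j < k then (if row.getD j 0 > res.getD j 0 then row.getD j 0 else res.getD j 0)
      else res.getD j 0 := by
  induction k generalizing res with
  | zero => simp
  | succ k ih =>
      rw [List.range_succ, List.foldl_append]
      simp only [List.foldl_cons, List.foldl_nil]
      have hlen := innerB_length row k res
      have ihj := ih res hj (by omega)
      split
      · rename_i hcond
        rw [List.getD_eq_getElem?_getD, List.getElem?_set_of_lt' _ _ (show k < _ by omega)]
        by_cases hkj : k = j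
        · subst hkj
          rw [if_pos rfl, Option.getD_some, if_pos (show k < k + 1 by omega)]
          rw [ih res hj (by omega), if_neg (show ¬ k < k by omega)] at hcond
          simp only [PySem.List.pyGetD_natCast] at hcond ⊢
          rw [if_pos hcond]
        · rw [if_neg hkj, ← List.getD_eq_getElem?_getD, ihj]
          by_cases hjk : j < k
          · rw [if_pos hjk, if_pos (show j < k + 1 by omega)]
          · rw [if_neg hjk, if_neg (show ¬ j < k + 1 by omega)]
      · rename_i hcond
        rw [ihj]
        by_cases hjk : j < k
        · rw [if_pos hjk, if_pos (show j < k + 1 by omega)]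
        · rw [if_neg hjk]
          by_cases hkj : j = k
          · subst hkj
            rw [if_pos (show j < j + 1 by omega)]
            rw [ih res hj (by omega), if_neg hjk] at hcond
            simp only [PySem.List.pyGetD_natCast] at hcond
            rw [if_neg hcond]
          · rw [if_neg (show ¬ j < k + 1 by omega)]

-- B's outer loop: length preserved
lemma outerB_length (grid : List (List Int)) (n : Nat) (res : List Int) :
    (grid.foldl (fun result row =>
      (List.range n).foldl (fun result (i : Nat) =>
        if PySem.List.pyGetD row (i : Int) 0 > result.getD i 0
        then result.set i (PySem.List.pyGetD row (i : Int) 0) else result) result) res).length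
    = res.length := by
  induction grid generalizing res with
  | nil => rfl
  | cons row grid ih => rw [List.foldl_cons, ih, innerB_length]

-- B's outer loop, pointwise: position j accumulates the column-j fold
lemma outerB_getD (grid : List (List Int)) (n : Nat) (res : List Int) (j : Nat)
    (hlen : res.length = n) (hj : j < n) :
    (grid.foldl (fun result row =>
      (List.range n).foldl (fun result (i : Nat) =>
        if PySem.List.pyGetD row (i : Int) 0 > result.getD i 0
        then result.set i (PySem.List.pyGetD row (i : Int) 0) else result) result) res).getD j 0
    = grid.foldl (fun t row => if row.getD j 0 > t then row.getD j 0 else t) (res.getD j 0) := by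
  induction grid generalizing res with
  | nil => rfl
  | cons row grid ih =>
      rw [List.foldl_cons, List.foldl_cons]
      have hlen' : ((List.range n).foldl (fun result (i : Nat) =>
          if PySem.List.pyGetD row (i : Int) 0 > result.getD i 0
          then result.set i (PySem.List.pyGetD row (i : Int) 0) else result) res).length = n := by
        rw [innerB_length, hlen]
      rw [ih _ hlen', innerB_getD row n res j (by omega) (by omega), if_pos hj]

-- B computes the list of column maxima
lemma portB_eq_map (grid : List (List Int)) :
    maxvalue_in_column_alt grid = (List.range (grid.headD []).length).map (colMax grid) := by
  unfold maxvalue_in_column_alt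
  simp only []
  apply List.ext_getElem
  · rw [outerB_length]; simp
  · intro j h1 h2
    have hj : j < (grid.headD []).length := by simpa using h2
    have hmain := outerB_getD grid (grid.headD []).length
      (List.replicate (grid.headD []).length 0) j (by simp) hj
    have hrep : (List.replicate (grid.headD []).length (0 : Int)).getD j 0 = 0 := by
      rw [List.getD_eq_getElem?_getD, List.getElem?_replicate, if_pos hj, Option.getD_some]
    rw [hrep] at hmain
    rw [List.getD_eq_getElem?_getD, List.getElem?_eq_getElem h1, Option.getD_some] at hmain
    rw [List.getElem_map, List.getElem_range]
    exact hmain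

-- ===== VERDICT (by name: the statement is the Claim_ definition above) =====
theorem maxvalue_in_column_spec : Claim_equal_maxvalue_in_column := by
  intro grid _ _
  unfold Spec_maxvalue_in_column
  rw [portA_eq_map, portB_eq_map]
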